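-- pv_equiv track=rewrite | github.com/usc-isi-i2/kgtk | kgtk/augment/augment_utils.py | create_chain
-- ===== SOURCE A (Python) =====
-- def create_chain(qnodes_collect, property_, reverse_chain=True):
--     """
--     create the chain needed
--     """
--     qnode_chain = []
--     for i in range(len(qnodes_collect)):
--         if reverse_chain and i > 0:
--             qnode_chain.append({
--                 'node1': qnodes_collect[i],
--                 'label': property_ + '_prev',
--                 'node2': qnodes_collect[i - 1]
--             })
--         if i < len(qnodes_collect) - 1:
--             qnode_chain.append({
--                 'node1': qnodes_collect[i],
--                 'label': property_ + '_next',
--                 'node2': qnodes_collect[i + 1]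
--             })
--     return qnode_chain
-- ===== SOURCE B (Python) =====
-- def create_chain(qnodes_collect, property_, reverse_chain=True):
--     """
--     create the chain needed
--     """
--     pairs = list(zip(qnodes_collect, qnodes_collect[1:]))
--     nexts = [{'node1': a, 'label': property_ + '_next', 'node2': b}
--              for a, b in pairs]
--     if not reverse_chain:
--         return nexts
--     prevs = [{'node1': b, 'label': property_ + '_prev', 'node2': a}
--              for a, b in pairs]
--     chain = [None] * (2 * len(pairs))
--     chain[0::2] = nexts
--     chain[1::2] = prevs
--     return chain
-- ===== Notes on version B (the rewrite author's own statement) =====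
-- stated objective: alternative
-- what changed: Instead of one index loop emitting guarded edges in place, B builds the full list of next-edges and the full list of prev-edges in two separate staged passes and then riffles them together by even/odd slice assignment (chain[0::2]=nexts, chain[1::2]=prevs).
import Mathlib
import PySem

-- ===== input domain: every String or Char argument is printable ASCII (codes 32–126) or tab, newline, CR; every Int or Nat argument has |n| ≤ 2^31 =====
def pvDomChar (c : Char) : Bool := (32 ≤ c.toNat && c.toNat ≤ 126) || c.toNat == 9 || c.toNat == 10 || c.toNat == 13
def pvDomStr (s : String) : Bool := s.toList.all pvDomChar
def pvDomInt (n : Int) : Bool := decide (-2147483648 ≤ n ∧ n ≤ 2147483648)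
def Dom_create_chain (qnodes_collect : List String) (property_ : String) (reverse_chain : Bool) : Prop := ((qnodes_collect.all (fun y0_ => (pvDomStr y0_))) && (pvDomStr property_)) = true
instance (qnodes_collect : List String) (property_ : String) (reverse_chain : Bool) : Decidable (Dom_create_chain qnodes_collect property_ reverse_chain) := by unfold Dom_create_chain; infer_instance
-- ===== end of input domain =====

-- B builds all next-edges and all prev-edges in two staged passes and riffles them
-- (even/odd slice assignment) instead of A's single guarded index loop; same output, same cost.

-- ===== PORT A =====
-- All list indices A uses (i, i-1 under i>0, i+1 under i<len-1) are in range, so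
-- `getD _ ""` is exact for Python's `qnodes_collect[...]` here (the default is never taken).
def create_chain (qnodes_collect : List String) (property_ : String) (reverse_chain : Bool) : List (List (String × String)) :=
  (List.range qnodes_collect.length).foldl (fun acc i =>
    let acc1 :=
      if reverse_chain = true ∧ 0 < i then
        acc ++ [[("node1", qnodes_collect.getD i ""),
                 ("label", property_ ++ "_prev"),
                 ("node2", qnodes_collect.getD (i - 1) "")]]
      else acc
    if i < qnodes_collect.length - 1 then
      acc1 ++ [[("node1", qnodes_collect.getD i ""),
                ("label", property_ ++ "_next"),
                ("node2", qnodes_collect.getD (i + 1) "")]]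
    else acc1) []

-- ===== PORT B =====
-- Python's even/odd slice assignment `chain[0::2] = nexts; chain[1::2] = prevs` on a
-- fresh list of length 2*len(pairs) is exactly the riffle of the two equal-length lists;
-- ccRiffle is its direct rendering (element k of nexts at position 2k, of prevs at 2k+1).
def ccRiffle : List (List (String × String)) → List (List (String × String)) → List (List (String × String))
  | [], bs => bs
  | a :: as, [] => a :: as
  | a :: as, b :: bs => a :: b :: ccRiffle as bs

def create_chain_alt (qnodes_collect : List String) (property_ : String) (reverse_chain : Bool) : List (List (String × String)) :=
  let pairs := qnodes_collect.zip qnodes_collect.tail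
  let nexts := pairs.map (fun ab =>
    [("node1", ab.1), ("label", property_ ++ "_next"), ("node2", ab.2)])
  if reverse_chain = false then nexts
  else
    let prevs := pairs.map (fun ab =>
      [("node1", ab.2), ("label", property_ ++ "_prev"), ("node2", ab.1)])
    ccRiffle nexts prevs

-- ===== PRECONDITION & SPEC =====
def Spec_create_chain (qnodes_collect : List String) (property_ : String) (reverse_chain : Bool) (out : List (List (String × String))) : Prop := out = create_chain_alt qnodes_collect property_ reverse_chain
instance (qnodes_collect : List String) (property_ : String) (reverse_chain : Bool) (out : List (List (String × String))) : Decidable (Spec_create_chain qnodes_collect property_ reverse_chain out) := by unfold Spec_create_chain; infer_instance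

-- ===== CLAIM (what is proved, stated in full; the proofs are below) =====
def Claim_equal_create_chain : Prop := ∀ (qnodes_collect : List String) (property_ : String) (reverse_chain : Bool), Dom_create_chain qnodes_collect property_ reverse_chain → Spec_create_chain qnodes_collect property_ reverse_chain (create_chain qnodes_collect property_ reverse_chain)

-- ===== LEMMAS AND PROOFS =====

-- per-index contribution of A's loop body
def ccStep (qs : List String) (p : String) (r : Bool) (i : Nat) : List (List (String × String)) :=
  (if r = true ∧ 0 < i then
     [[("node1", qs.getD i ""), ("label", p ++ "_prev"), ("node2", qs.getD (i - 1) "")]]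
   else []) ++
  (if i < qs.length - 1 then
     [[("node1", qs.getD i ""), ("label", p ++ "_next"), ("node2", qs.getD (i + 1) "")]]
   else [])

theorem create_chain_eq_flatMap (qs : List String) (p : String) (r : Bool) :
    create_chain qs p r = (List.range qs.length).flatMap (ccStep qs p r) := by
  unfold create_chain
  have hf : (fun (acc : List (List (String × String))) i =>
      let acc1 :=
        if r = true ∧ 0 < i then
          acc ++ [[("node1", qs.getD i ""), ("label", p ++ "_prev"), ("node2", qs.getD (i - 1) "")]]
        else acc
      if i < qs.length - 1 then
        acc1 ++ [[("node1", qs.getD i ""), ("label", p ++ "_next"), ("node2", qs.getD (i + 1) "")]]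
      else acc1) = (fun acc i => acc ++ ccStep qs p r i) := by
    funext acc i
    simp only [ccStep]
    split_ifs <;> simp
  rw [hf, PySem.List.foldl_append_eq_flatMap]
  simp

theorem ccStep_shift (a b : String) (t : List String) (p : String) (r : Bool) (i : Nat) :
    ccStep (a :: b :: t) p r (i + 2) = ccStep (b :: t) p r (i + 1) := by
  have hg : (i + 2 < (a :: b :: t).length - 1) = (i + 1 < (b :: t).length - 1) := by
    simp; omega
  simp only [ccStep, hg, List.getD_cons_succ]
  simp

theorem create_chain_cons2 (a b : String) (t : List String) (p : String) (r : Bool) :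
    create_chain (a :: b :: t) p r =
      [[("node1", a), ("label", p ++ "_next"), ("node2", b)]] ++
      (if r then [[("node1", b), ("label", p ++ "_prev"), ("node2", a)]] else []) ++
      create_chain (b :: t) p r := by
  rw [create_chain_eq_flatMap, create_chain_eq_flatMap]
  have h2 : (a :: b :: t).length = t.length + 1 + 1 := by simp
  have h1 : (b :: t).length = t.length + 1 := by simp
  rw [h2, h1, List.range_succ_eq_map, List.range_succ_eq_map]
  simp only [List.flatMap_cons, List.flatMap_map]
  have hsh : ∀ i : Nat, ccStep (a :: b :: t) p r (i + 1 + 1) = ccStep (b :: t) p r (i + 1) :=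
    fun i => ccStep_shift a b t p r i
  simp only [hsh]
  have h0 : ccStep (a :: b :: t) p r 0 =
      [[("node1", a), ("label", p ++ "_next"), ("node2", b)]] := by
    simp [ccStep]
  have hone : ccStep (a :: b :: t) p r 1 =
      (if r then [[("node1", b), ("label", p ++ "_prev"), ("node2", a)]] else []) ++
      ccStep (b :: t) p r 0 := by
    simp only [ccStep]
    cases r <;> cases t <;> simp
  rw [h0, hone]
  simp [ccStep]

theorem create_chain_alt_cons2 (a b : String) (t : List String) (p : String) (r : Bool) :
    create_chain_alt (a :: b :: t) p r =
      [[("node1", a), ("label", p ++ "_next"), ("node2", b)]] ++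
      (if r then [[("node1", b), ("label", p ++ "_prev"), ("node2", a)]] else []) ++
      create_chain_alt (b :: t) p r := by
  cases r <;> simp [create_chain_alt, ccRiffle]

-- ===== VERDICT (by name: the statement is the Claim_ definition above) =====
theorem create_chain_spec : Claim_equal_create_chain := by
  intro qs p r hd
  clear hd
  unfold Spec_create_chain
  induction qs with
  | nil => cases r <;> simp [create_chain, create_chain_alt, ccRiffle]
  | cons a t ih =>
    cases t with
    | nil =>
      rw [create_chain_eq_flatMap]
      cases r <;> simp [ccStep, create_chain_alt, ccRiffle]
    | cons b t' =>
      rw [create_chain_cons2, create_chain_alt_cons2, ih]
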